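-- pv_equiv track=rewrite | github.com/mishrakeshav/Competitive-Programming | binarysearch.io/longest_anagram_subsequence.py | solve
-- ===== SOURCE A (Python) =====
-- def solve(a, b):
--     # Write your code here
--     c1 = dict()
--     for char in a:
--         if char not in c1:
--             c1[char] = 0
--         c1[char] += 1
--     c2 = dict()
--     for char in b:
--         if char not in c2:
--             c2[char] = 0
--         c2[char] += 1
--     max_len = 0
--     for char in c1:
--         if char in c2:
--             max_len += min(c1[char],c2[char])
--     return max_len
-- ===== SOURCE B (Python) =====
-- def solve(a, b):
--     # One counter of a, greedily consumed in a single pass over b.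
--     remaining = {}
--     for char in a:
--         remaining[char] = remaining.get(char, 0) + 1
--     result = 0
--     for char in b:
--         if remaining.get(char, 0) > 0:
--             result += 1
--             remaining[char] = remaining[char] - 1
--     return result
-- ===== Notes on version B (the rewrite author's own statement) =====
-- stated objective: alternative
-- what changed: Instead of building two frequency dicts and summing min counts over shared keys, B builds one counter of a and greedily consumes it in a single pass over b, counting each matched character.
import Mathlib
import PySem

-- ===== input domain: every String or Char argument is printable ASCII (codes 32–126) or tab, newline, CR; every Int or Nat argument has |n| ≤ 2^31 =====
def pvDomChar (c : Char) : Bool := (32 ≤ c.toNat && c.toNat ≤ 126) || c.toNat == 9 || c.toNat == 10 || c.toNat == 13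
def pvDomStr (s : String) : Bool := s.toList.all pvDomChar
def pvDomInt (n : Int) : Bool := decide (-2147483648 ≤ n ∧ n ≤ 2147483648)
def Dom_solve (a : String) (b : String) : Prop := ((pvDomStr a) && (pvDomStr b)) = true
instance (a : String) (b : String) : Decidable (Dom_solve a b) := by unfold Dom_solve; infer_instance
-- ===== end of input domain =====

-- B changes the decomposition: one counter of `a` greedily consumed in a single pass over `b`,
-- instead of A's two counters with a min-sum over shared keys. Same cost; no side effects.

-- ===== PORT A =====
def solve (a : String) (b : String) : Int :=
  let c1 := a.toList.foldl (fun d ch =>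
    let d := if !(d.contains ch) then d.insert ch (0 : Int) else d
    d.insert ch (d.getD ch 0 + 1)) PySem.Dict.empty
  let c2 := b.toList.foldl (fun d ch =>
    let d := if !(d.contains ch) then d.insert ch (0 : Int) else d
    d.insert ch (d.getD ch 0 + 1)) PySem.Dict.empty
  c1.keys.foldl (fun acc ch =>
    if c2.contains ch then acc + min (c1.getD ch 0) (c2.getD ch 0) else acc) 0

-- ===== PORT B =====
def solve_alt (a : String) (b : String) : Int :=
  let remaining := a.toList.foldl
    (fun d ch => d.insert ch (d.getD ch 0 + 1)) PySem.Dict.empty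
  let final := b.toList.foldl
    (fun (s : PySem.Dict Char Int × Int) ch =>
      if s.1.getD ch 0 > 0 then (s.1.insert ch (s.1.getD ch 0 - 1), s.2 + 1) else s)
    (remaining, 0)
  final.2

-- ===== PRECONDITION & SPEC =====
def Spec_solve (a : String) (b : String) (out : Int) : Prop := out = solve_alt a b
instance (a : String) (b : String) (out : Int) : Decidable (Spec_solve a b out) := by unfold Spec_solve; infer_instance

-- ===== CLAIM (what is proved, stated in full; the proofs are below) =====
def Claim_equal_solve : Prop := ∀ (a : String) (b : String), Dom_solve a b → Spec_solve a b (solve a b)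

-- ===== LEMMAS AND PROOFS =====

-- A's counting-loop body is pointwise the plain `insert (getD + 1)` body.
theorem countBody_eq (d : PySem.Dict Char Int) (ch : Char) :
    (let d' := if !(d.contains ch) then d.insert ch (0 : Int) else d
     d'.insert ch (d'.getD ch 0 + 1)) = d.insert ch (d.getD ch 0 + 1) := by
  by_cases h : d.contains ch
  · simp [h]
  · simp only [Bool.not_eq_true] at h
    simp [h, PySem.Dict.insert_insert_self, PySem.Dict.getD_insert_self,
      PySem.Dict.getD_of_not_contains _ _ h]

theorem countFold_eq (l : List Char) :
    l.foldl (fun d ch =>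
      let d := if !(d.contains ch) then d.insert ch (0 : Int) else d
      d.insert ch (d.getD ch 0 + 1)) PySem.Dict.empty
    = l.foldl (fun d ch => d.insert ch (d.getD ch 0 + 1)) PySem.Dict.empty := by
  apply PySem.List.foldl_congr_mem
  intro acc x _
  exact countBody_eq acc x

-- The pure greedy consumption process B performs, over a capacity function.
def greedyCount (g : Char → Nat) : List Char → Nat
  | [] => 0
  | c :: t =>
      if 0 < g c then 1 + greedyCount (Function.update g c (g c - 1)) t
      else greedyCount g t

-- Greedy consumption equals the min-sum over any finite superset of l's characters.
theorem greedy_sum (S : Finset Char) :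
    ∀ (l : List Char) (g : Char → Nat), (∀ c ∈ l, c ∈ S) →
      greedyCount g l = ∑ c ∈ S, min (g c) (l.count c) := by
  intro l
  induction l with
  | nil => intro g _; simp [greedyCount]
  | cons c t ih =>
    intro g hmem
    have hcS : c ∈ S := hmem c (List.mem_cons_self ..)
    by_cases hc : 0 < g c
    · rw [greedyCount, if_pos hc,
        ih (Function.update g c (g c - 1)) (fun x hx => hmem x (List.mem_cons_of_mem _ hx))]
      rw [← Finset.add_sum_erase _ _ hcS, ← Finset.add_sum_erase _ _ hcS]
      have h1 : min (g c) ((c :: t).count c) = 1 + min (Function.update g c (g c - 1) c) (t.count c) := by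
        simp [Function.update_self]
        omega
      rw [h1]
      have h2 : ∀ x ∈ S.erase c,
          min (Function.update g c (g c - 1) x) (t.count x) = min (g x) ((c :: t).count x) := by
        intro x hx
        have hne : x ≠ c := Finset.ne_of_mem_erase hx
        simp [Function.update_of_ne hne, Ne.symm hne]
      rw [Finset.sum_congr rfl h2, add_assoc]
    · rw [greedyCount, if_neg hc, ih g (fun x hx => hmem x (List.mem_cons_of_mem _ hx))]
      apply Finset.sum_congr rfl
      intro x hx
      by_cases hxc : x = c
      · subst hxc; omega
      · simp [Ne.symm hxc]
  
-- B's fold over b computes r + greedyCount g l whenever the dict realises g.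
theorem altFold_eq (l : List Char) :
    ∀ (d : PySem.Dict Char Int) (r : Int) (g : Char → Nat),
      (∀ ch, d.getD ch 0 = (g ch : Int)) →
      (l.foldl (fun (s : PySem.Dict Char Int × Int) ch =>
        if s.1.getD ch 0 > 0 then (s.1.insert ch (s.1.getD ch 0 - 1), s.2 + 1) else s)
        (d, r)).2 = r + (greedyCount g l : Int) := by
  induction l with
  | nil => intro d r g _; simp [greedyCount]
  | cons c t ih =>
    intro d r g hg
    by_cases hc : 0 < g c
    · have hpos : d.getD c 0 > 0 := by rw [hg]; exact_mod_cast hc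
      rw [List.foldl_cons, if_pos hpos,
        ih _ _ (Function.update g c (g c - 1)) (by
          intro ch
          rw [PySem.Dict.getD_insert]
          by_cases h : ch = c
          · subst h; rw [Function.update_self, hg]; simp; omega
          · rw [Function.update_of_ne h, if_neg h, hg])]
      rw [greedyCount, if_pos hc]
      push_cast
      ring
    · have hnpos : ¬ d.getD c 0 > 0 := by rw [hg]; omega
      rw [List.foldl_cons, if_neg hnpos, ih _ _ g hg, greedyCount, if_neg hc]

theorem solve_alt_eq (a b : String) :
    solve_alt a b = (greedyCount (fun ch => a.toList.count ch) b.toList : Int) := by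
  unfold solve_alt
  rw [altFold_eq _ _ _ (fun ch => a.toList.count ch) (by
    intro ch
    rw [PySem.Dict.getD_foldl_insert_add_one]
    simp)]
  simp

theorem solve_eq (a b : String) :
    solve a b =
      ((((PySem.List.dedup a.toList).filter (fun ch => decide (ch ∈ b.toList))).map
        (fun ch => min (a.toList.count ch) (b.toList.count ch))).sum : Int) := by
  unfold solve
  dsimp only
  rw [countFold_eq, countFold_eq,
    PySem.Dict.foldl_insert_getD_add_one_eq_counter,
    PySem.Dict.foldl_insert_getD_add_one_eq_counter]
  rw [PySem.Dict.keys_counter]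
  have hbody : ∀ (acc : Int) (ch : Char), ch ∈ PySem.Set.ofList a.toList →
      (if (PySem.Dict.counter b.toList).contains ch then
        acc + min ((PySem.Dict.counter a.toList).getD ch 0) ((PySem.Dict.counter b.toList).getD ch 0)
       else acc)
      = (if decide (ch ∈ b.toList) = true then
          acc + ((min (a.toList.count ch) (b.toList.count ch) : Nat) : Int) else acc) := by
    intro acc ch _
    rw [PySem.Dict.contains_counter, PySem.Dict.getD_counter, PySem.Dict.getD_counter]
    by_cases h : ch ∈ b.toList
    · simp [h, Nat.cast_min]
    · simp [h]
  rw [PySem.List.foldl_congr_mem _ _ _ _ hbody]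
  rw [PySem.List.foldl_if_eq_foldl_filter, PySem.List.foldl_add]
  simp only [← PySem.List.dedup_eq_ofList, zero_add, Nat.cast_list_sum, List.map_map,
    Function.comp_def, Nat.cast_min]

-- ===== VERDICT (by name: the statement is the Claim_ definition above) =====
theorem solve_spec : Claim_equal_solve := by
  intro a b _
  unfold Spec_solve
  rw [solve_eq, solve_alt_eq]
  rw [greedy_sum (a.toList ++ b.toList).toFinset b.toList (fun ch => a.toList.count ch)
    (by intro c hc; simp [hc])]
  norm_cast
  rw [← List.sum_toFinset _ (List.Nodup.filter _ (PySem.List.nodup_dedup a.toList))]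
  apply Finset.sum_subset
  · intro x hx
    simp only [List.mem_toFinset, List.mem_filter, PySem.List.mem_dedup] at hx
    simp [hx.1]
  · intro x hx hnx
    simp only [List.mem_toFinset, List.mem_filter, PySem.List.mem_dedup,
      decide_eq_true_eq, not_and] at hx hnx
    simp only [List.mem_append] at hx
    rcases hx with ha | hb
    · simp [List.count_eq_zero_of_not_mem (fun h => hnx ha h)]
    · by_cases ha : x ∈ a.toList
      · simp [List.count_eq_zero_of_not_mem (fun h => hnx ha h)]
      · simp [List.count_eq_zero_of_not_mem ha]
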